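-- pv_equiv track=rewrite | github.com/PPEXCEPED/Ecog_covert | covert-reading/HS_reading/feature_extract.py | find_continus
-- ===== SOURCE A (Python) =====
-- def find_continus(aa):
--     l1 = []
--     total = []
--     for x in sorted(set(aa)):
--         l1.append(x)
--         if x + 1 not in aa:
--             if 0 not in l1 and aa[-1] not in l1:
--                 total.append(l1)
--             l1 = []
--     return total
-- ===== SOURCE B (Python) =====
-- def find_continus(aa):
--     if not aa:
--         return []
--     vals = set(aa)
--     last = aa[-1]
--     out = []
--     for v in sorted(vals):
--         if v - 1 in vals:
--             continue  # v is inside a run, not its start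
--         run = []
--         w = v
--         while w in vals:
--             run.append(w)
--             w += 1
--         if 0 not in run and last not in run:
--             out.append(run)
--     return out
-- ===== Notes on version B (the rewrite author's own statement) =====
-- stated objective: faster
-- what changed: Replaces A's accumulate-and-break loop with 'x+1 not in aa' list scans by the hash-set consecutive-sequence algorithm: detect run starts (v-1 not in the set) and walk each run upward via O(1) set membership.
import Mathlib
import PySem

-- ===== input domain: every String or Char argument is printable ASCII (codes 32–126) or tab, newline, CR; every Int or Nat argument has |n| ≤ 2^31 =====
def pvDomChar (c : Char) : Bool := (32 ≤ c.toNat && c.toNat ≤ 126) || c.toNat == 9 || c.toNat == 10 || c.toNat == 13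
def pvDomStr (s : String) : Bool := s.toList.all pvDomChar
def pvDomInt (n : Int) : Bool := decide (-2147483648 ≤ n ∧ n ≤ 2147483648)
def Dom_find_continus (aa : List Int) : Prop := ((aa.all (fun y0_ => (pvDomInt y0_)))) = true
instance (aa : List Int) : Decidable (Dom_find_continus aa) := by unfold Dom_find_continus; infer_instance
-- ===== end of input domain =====

-- B replaces A's accumulate-and-break loop (with 'x+1 not in aa' list scans) by the hash-set
-- consecutive-sequence algorithm: detect run starts (v-1 not in the set) and walk each run upward
-- via set membership, filtering runs as they are produced (measured asymptotically faster).


-- ===== PORT A =====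
-- 'aa[-1] not in l1'; the none branch is unreachable (the loop body only runs when aa ≠ [])
def lastNotIn (aa l1 : List Int) : Bool :=
  match PySem.List.pyGet? aa (-1) with
  | some v => !l1.contains v
  | none => true

-- one iteration of A's 'for x in sorted(set(aa))' loop, state = (l1, total)
def aStep (aa : List Int) (st : List Int × List (List Int)) (x : Int) : List Int × List (List Int) :=
  let l1 := st.1 ++ [x]
  if !aa.contains (x + 1) then
    if !l1.contains 0 && lastNotIn aa l1 then (([] : List Int), st.2 ++ [l1]) else ([], st.2)
  else (l1, st.2)

def find_continus (aa : List Int) : List (List Int) :=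
  ((PySem.List.sorted (PySem.Set.ofList aa) (fun x => x) false).foldl (aStep aa) ([], [])).2

-- ===== PORT B =====
-- termination measure fact for B's while loop (cited by name in walk's decreasing_by)
theorem filter_succ_le (S : List Int) (w : Int) :
    (S.filter (fun x => decide (w + 1 ≤ x))).length ≤ (S.filter (fun x => decide (w ≤ x))).length := by
  induction S with
  | nil => simp
  | cons a t ih => simp only [List.filter_cons]; split_ifs <;> simp_all <;> omega

theorem filterLenLt (S : List Int) (w : Int) (h : w ∈ S) :
    (S.filter (fun x => decide (w + 1 ≤ x))).length < (S.filter (fun x => decide (w ≤ x))).length := by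
  induction S with
  | nil => simp at h
  | cons a t ih =>
    have hle := filter_succ_le t w
    by_cases haw : a = w
    · subst haw
      have h1 : (List.filter (fun x => decide (a ≤ x)) (a :: t))
          = a :: List.filter (fun x => decide (a ≤ x)) t := by
        simp
      have h2 : (List.filter (fun x => decide (a + 1 ≤ x)) (a :: t))
          = List.filter (fun x => decide (a + 1 ≤ x)) t := by
        simp
      rw [h1, h2, List.length_cons]
      omega
    · have hw : w ∈ t := by
        rcases List.mem_cons.mp h with h | h
        · exact absurd h.symm haw
        · exact h
      have hlt := ih hw
      simp only [List.filter_cons]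
      split_ifs with p q <;> simp only [decide_eq_true_eq] at * <;>
        (try simp only [List.length_cons]) <;> omega

-- 'while w in vals: run.append(w); w += 1' — the Python while loop, step for step
-- (terminates because each step removes one element of vals from the values ≥ w)
def walk (S : List Int) (w : Int) : List Int :=
  if h : S.contains w then w :: walk S (w + 1) else []
termination_by (S.filter (fun x => decide (w ≤ x))).length
decreasing_by exact filterLenLt S w (by simpa using h)

-- one iteration of B's 'for v in sorted(vals)' loop (the 'continue' is the first branch)
def bStep (S : List Int) (last : Int) (out : List (List Int)) (v : Int) : List (List Int) :=
  if S.contains (v - 1) then out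
  else
    let run := walk S v
    if !run.contains 0 && !run.contains last then out ++ [run] else out

def find_continus_alt (aa : List Int) : List (List Int) :=
  match PySem.List.pyGet? aa (-1) with
  | none => []                                   -- 'if not aa: return []'
  | some last =>
    let vals := PySem.Set.ofList aa
    (PySem.List.sorted vals (fun x => x) false).foldl (bStep vals last) []

-- ===== PRECONDITION & SPEC =====
def Spec_find_continus (aa : List Int) (out : List (List Int)) : Prop := out = find_continus_alt aa
instance (aa : List Int) (out : List (List Int)) : Decidable (Spec_find_continus aa out) := by unfold Spec_find_continus; infer_instance

-- ===== CLAIM (what is proved, stated in full; the proofs are below) =====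
def Claim_equal_find_continus : Prop := ∀ (aa : List Int), Dom_find_continus aa → Spec_find_continus aa (find_continus aa)

-- ===== LEMMAS AND PROOFS =====

theorem walk_eq (S : List Int) (w : Int) :
    walk S w = if S.contains w then w :: walk S (w + 1) else [] := by
  rw [walk]; split <;> simp_all

-- the walk only tests values ≥ its start, so agreeing memberships above w give equal walks
theorem walk_congr : ∀ (n : Nat) (S T : List Int) (w : Int),
    (S.filter (fun x => decide (w ≤ x))).length ≤ n →
    (∀ u : Int, w ≤ u → S.contains u = T.contains u) →
    walk S w = walk T w := by
  intro n
  induction n with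
  | zero =>
    intro S T w hn h
    have hS : S.contains w = false := by
      cases hc : S.contains w with
      | false => rfl
      | true =>
        exfalso
        have : w ∈ S := by simpa using hc
        have := filterLenLt S w this
        omega
    have hT : T.contains w = false := by rw [← h w le_rfl]; exact hS
    rw [walk_eq S w, walk_eq T w, hS, hT]
    simp
  | succ n ih =>
    intro S T w hn h
    rw [walk_eq S w, walk_eq T w, ← h w le_rfl]
    cases hc : S.contains w with
    | false => rfl
    | true =>
      have hlt := filterLenLt S w (by simpa using hc)
      have : (S.filter (fun x => decide (w + 1 ≤ x))).length ≤ n := by omega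
      rw [ih S T (w + 1) this (fun u hu => h u (by omega))]

-- ---- proof-side adjacency grouping (links A's flush-on-break loop to B's start-and-walk) ----

-- extend the last run if it ends at v-1, else open a new run (left-fold form)
def adjStep (runs : List (List Int)) (v : Int) : List (List Int) :=
  match runs.getLast? with
  | some r => if r.getLast? = some (v - 1) then runs.dropLast ++ [r ++ [v]] else runs ++ [[v]]
  | none => [[v]]

-- the same grouping by recursion from the right
def groupR : List Int → List (List Int)
  | [] => []
  | x :: t =>
    match groupR t with
    | (y :: r) :: rs => if y = x + 1 then (x :: y :: r) :: rs else [x] :: (y :: r) :: rs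
    | _ => [[x]]

-- merging a pending nonempty run into an already-grouped tail
def attachRun (cur : List Int) : List (List Int) → List (List Int)
  | (y :: r) :: rs => if cur.getLast? = some (y - 1) then (cur ++ y :: r) :: rs else cur :: (y :: r) :: rs
  | _ => [cur]

theorem groupR_cons (x : Int) (t : List Int) :
    groupR (x :: t) = match groupR t with
      | (y :: r) :: rs => if y = x + 1 then (x :: y :: r) :: rs else [x] :: (y :: r) :: rs
      | _ => [[x]] := by
  rw [groupR]

theorem adjStep_ne_nil (runs : List (List Int)) (v : Int) : adjStep runs v ≠ [] := by
  unfold adjStep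
  cases h : runs.getLast? with
  | none => simp
  | some r => by_cases hif : r.getLast? = some (v - 1) <;> simp [hif]

-- adjStep only touches the last run: a nonempty suffix of the state absorbs the whole fold
theorem foldl_adjStep_append (s : List Int) :
    ∀ (runs rest : List (List Int)), rest ≠ [] →
      s.foldl adjStep (runs ++ rest) = runs ++ s.foldl adjStep rest := by
  induction s with
  | nil => intro runs rest h; simp
  | cons v s ih =>
    intro runs rest h
    have hstep : adjStep (runs ++ rest) v = runs ++ adjStep rest v := by
      unfold adjStep
      rw [List.getLast?_append_of_ne_nil runs h]
      cases hr : rest.getLast? with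
      | none => exact absurd (List.getLast?_eq_none_iff.mp hr) h
      | some r =>
        by_cases hif : r.getLast? = some (v - 1)
        · simp [hif, List.dropLast_append_of_ne_nil h]
        · simp [hif]
    simp only [List.foldl_cons, hstep]
    exact ih (runs) (adjStep rest v) (adjStep_ne_nil rest v)

-- if the head of s cannot extend cur, cur is frozen as the first run
theorem foldl_adjStep_frozen (s : List Int) (cur : List Int)
    (h : ∀ y, s.head? = some y → cur.getLast? ≠ some (y - 1)) :
    s.foldl adjStep [cur] = cur :: s.foldl adjStep [] := by
  cases s with
  | nil => simp
  | cons y s' =>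
    have h1 : adjStep [cur] y = [cur, [y]] := by
      unfold adjStep
      simp [h y rfl]
    have h2 : adjStep ([] : List (List Int)) y = [[y]] := by unfold adjStep; simp
    simp only [List.foldl_cons, h1, h2]
    have := foldl_adjStep_append s' [cur] [[y]] (by simp)
    simpa using this

-- in a strictly increasing list, x+1 is a member iff it is the head (all elements exceed x)
theorem mem_iff_head_succ (rest : List Int) (x : Int)
    (hp : rest.Pairwise (· < ·)) (hgt : ∀ y ∈ rest, x < y) :
    ((x + 1) ∈ rest ↔ rest.head? = some (x + 1)) := by
  cases rest with
  | nil => simp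
  | cons y t =>
    simp only [List.head?_cons, Option.some.injEq, List.mem_cons]
    constructor
    · rintro (h | h)
      · omega
      · have h1 : x < y := hgt y (by simp)
        have h2 : y < x + 1 := (List.pairwise_cons.mp hp).1 _ h
        omega
    · intro h; exact Or.inl h.symm

-- the core invariant: A's fold from state (l1, total) equals total ++ filtered adj-fold from the open run
theorem main_inv (aa : List Int) (last : Int)
    (hlast : PySem.List.pyGet? aa (-1) = some last) :
    ∀ (s l1 : List Int) (total : List (List Int)),
      s.Pairwise (· < ·) →
      (∀ x ∈ s, aa.contains (x + 1) = decide ((x + 1) ∈ s)) →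
      (∀ p, l1.getLast? = some p → s.head? = some (p + 1)) →
      (s.foldl (aStep aa) (l1, total)).2
        = total ++ (s.foldl adjStep (if l1.isEmpty then [] else [l1])).filter
            (fun r => !r.contains 0 && !r.contains last) := by
  intro s
  induction s with
  | nil =>
    intro l1 total _ _ hlink
    by_cases hl : l1 = []
    · subst hl; simp
    · exfalso
      have := hlink _ (List.getLast?_eq_some_getLast hl)
      simp at this
  | cons x rest ih =>
    intro l1 total hp hc hlink
    have hpt : rest.Pairwise (· < ·) := (List.pairwise_cons.mp hp).2
    have hgt : ∀ y ∈ rest, x < y := (List.pairwise_cons.mp hp).1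
    have hc' : ∀ x' ∈ rest, aa.contains (x' + 1) = decide ((x' + 1) ∈ rest) := by
      intro x' hx'
      have h1 := hc x' (List.mem_cons_of_mem _ hx')
      have hne : x' + 1 ≠ x := by have := hgt x' hx'; omega
      rw [h1]; simp [hne]
    have hmemiff := mem_iff_head_succ rest x hpt hgt
    have hcx := hc x (List.mem_cons_self)
    have hxne : x + 1 ≠ x := by omega
    -- the open run after processing x is l1 ++ [x], on the adj side too
    have hBstep : adjStep (if l1.isEmpty then [] else [l1]) x = [l1 ++ [x]] := by
      by_cases hl : l1 = []
      · subst hl; simp [adjStep]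
      · have hlast1 : l1.getLast? = some (l1.getLast hl) := List.getLast?_eq_some_getLast hl
        have hhead := hlink _ hlast1
        have hx : l1.getLast hl = x - 1 := by
          simp only [List.head?_cons, Option.some.injEq] at hhead; omega
        rw [if_neg (by simpa using hl)]
        unfold adjStep
        simp [hlast1, hx]
    by_cases hmem : (x + 1) ∈ rest
    · -- continue: x+1 present, A keeps accumulating, adj extends the run
      have hin : (x + 1) ∈ aa := by
        have := hcx; rw [List.contains_eq_mem] at this
        exact of_decide_eq_true (by rw [this]; simp [hxne, hmem])
      have hstepA : aStep aa (l1, total) x = (l1 ++ [x], total) := by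
        unfold aStep; simp [hin]
      have hlink' : ∀ p, (l1 ++ [x]).getLast? = some p → rest.head? = some (p + 1) := by
        intro p hpp
        rw [List.getLast?_concat] at hpp
        cases hpp
        exact hmemiff.mp hmem
      have := ih (l1 ++ [x]) total hpt hc' hlink'
      simp only [List.foldl_cons, hstepA, this, hBstep]
      simp
    · -- break: x+1 absent, A flushes l1 ++ [x], adj freezes the run
      have hout : (x + 1) ∉ aa := by
        intro hin
        have := hcx; rw [List.contains_eq_mem] at this
        have : (x + 1) ∈ (x :: rest) := of_decide_eq_true (by rw [← this]; simpa using hin)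
        rcases List.mem_cons.mp this with h | h
        · exact hxne h
        · exact hmem h
      have hln : lastNotIn aa (l1 ++ [x]) = !(l1 ++ [x]).contains last := by
        unfold lastNotIn; rw [hlast]
      have hstepA : aStep aa (l1, total) x =
          (([] : List Int),
            if !(l1 ++ [x]).contains 0 && !(l1 ++ [x]).contains last
            then total ++ [l1 ++ [x]] else total) := by
        unfold aStep
        simp only [hln]
        simp [hout]
        split <;> rfl
      have hfroz : rest.foldl adjStep [l1 ++ [x]] = (l1 ++ [x]) :: rest.foldl adjStep [] := by
        apply foldl_adjStep_frozen
        intro y hy hgl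
        rw [List.getLast?_concat] at hgl
        have hxy : x = y - 1 := by simpa using hgl
        exact hmem (hmemiff.mpr (by rw [hy]; congr 1; omega))
      have := ih [] (if !(l1 ++ [x]).contains 0 && !(l1 ++ [x]).contains last
            then total ++ [l1 ++ [x]] else total) hpt hc' (by intro p h; simp at h)
      simp only [List.foldl_cons, hstepA, this, hBstep, hfroz]
      simp only [List.isEmpty_nil, if_true, List.filter_cons]
      split <;> simp_all

-- every group produced by groupR is nonempty with an explicit head
theorem groupR_cons_head (y : Int) (t : List Int) :
    ∃ r rs, groupR (y :: t) = (y :: r) :: rs := by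
  unfold groupR
  cases hg : groupR t with
  | nil => exact ⟨[], [], rfl⟩
  | cons g gs =>
    cases g with
    | nil => exact ⟨[], [], rfl⟩
    | cons z r =>
      by_cases hz : z = y + 1
      · exact ⟨z :: r, gs, by simp [hz]⟩
      · exact ⟨[], (z :: r) :: gs, by simp [hz]⟩

-- the left fold with a pending nonempty run = attach that run to the right-recursive grouping
theorem foldl_adjStep_attach : ∀ (t : List Int) (cur : List Int), cur ≠ [] →
    t.foldl adjStep [cur] = attachRun cur (groupR t) := by
  intro t
  induction t with
  | nil => intro cur h; simp [groupR, attachRun]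
  | cons y t' ih =>
    intro cur hcur
    by_cases hext : cur.getLast? = some (y - 1)
    · have hstep : adjStep [cur] y = [cur ++ [y]] := by
        unfold adjStep; simp [hext]
      rw [List.foldl_cons, hstep, ih (cur ++ [y]) (by simp)]
      -- compare attachRun (cur ++ [y]) (groupR t') with attachRun cur (groupR (y :: t'))
      rw [groupR_cons]
      cases hg : groupR t' with
      | nil => simp [attachRun, hext]
      | cons g gs =>
        cases g with
        | nil =>
          rcases t' with _ | ⟨z, t''⟩
          · simp [groupR] at hg
          · obtain ⟨r, rs, hr⟩ := groupR_cons_head z t''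
            rw [hr] at hg; cases hg
        | cons z r =>
          by_cases hz : z = y + 1
          · subst hz
            simp only [attachRun, hext, if_pos, List.getLast?_concat]
            have : (y : Int) = y + 1 - 1 := by omega
            simp [← this]
          · have hne : ¬ (cur ++ [y]).getLast? = some (z - 1) := by
              rw [List.getLast?_concat]
              simp only [Option.some.injEq]
              omega
            simp [attachRun, hz, hext]
            omega
    · have hstep : adjStep [cur] y = [cur, [y]] := by
        unfold adjStep; simp [hext]
      rw [List.foldl_cons, hstep]
      have habs : ([cur] : List (List Int)) ++ [[y]] = [cur, [y]] := rfl
      rw [← habs, foldl_adjStep_append t' [cur] [[y]] (by simp), ih [y] (by simp)]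
      rw [groupR_cons]
      cases hg : groupR t' with
      | nil => simp [attachRun, hext]
      | cons g gs =>
        cases g with
        | nil =>
          rcases t' with _ | ⟨z, t''⟩
          · simp [groupR] at hg
          · obtain ⟨r, rs, hr⟩ := groupR_cons_head z t''
            rw [hr] at hg; cases hg
        | cons z r =>
          by_cases hz : z = y + 1
          · subst hz
            have hy : ([y] : List Int).getLast? = some (y + 1 - 1) := by
              simp
            simp [attachRun, hext, hy]
          · have hy : ¬ ([y] : List Int).getLast? = some (z - 1) := by
              simp only [List.getLast?_singleton, Option.some.injEq]
              omega
            simp [attachRun, hext, hz]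
            omega

theorem foldl_adjStep_groupR (s : List Int) : s.foldl adjStep [] = groupR s := by
  cases s with
  | nil => simp [groupR]
  | cons x t =>
    have h1 : adjStep [] x = [[x]] := by unfold adjStep; simp
    rw [List.foldl_cons, h1, foldl_adjStep_attach t [x] (by simp)]
    rw [groupR_cons]
    cases hg : groupR t with
    | nil => simp [attachRun]
    | cons g gs =>
      cases g with
      | nil =>
        rcases t with _ | ⟨z, t''⟩
        · simp [groupR] at hg
        · obtain ⟨r, rs, hr⟩ := groupR_cons_head z t''
          rw [hr] at hg; cases hg
      | cons z r =>
        by_cases hz : z = x + 1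
        · subst hz
          have : ([x] : List Int).getLast? = some (x + 1 - 1) := by simp
          simp [attachRun, this]
        · have : ¬ ([x] : List Int).getLast? = some (z - 1) := by
            simp only [List.getLast?_singleton, Option.some.injEq]; omega
          simp [attachRun, hz]
          omega

-- on a strictly increasing list, adjacency grouping = start detection + upward walk
theorem groupR_eq_walk (s : List Int) (hp : s.Pairwise (· < ·)) :
    groupR s = (s.filter (fun v => !s.contains (v - 1))).map (walk s) := by
  induction s with
  | nil => simp [groupR]
  | cons x t ih =>
    have hpt : t.Pairwise (· < ·) := (List.pairwise_cons.mp hp).2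
    have hgt : ∀ y ∈ t, x < y := (List.pairwise_cons.mp hp).1
    have hxstart : ((x :: t).contains (x - 1)) = false := by
      simp only [List.contains_eq_mem, List.mem_cons, decide_eq_false_iff_not, not_or]
      exact ⟨by omega, fun hmem => by have := hgt _ hmem; omega⟩
    -- membership above x agrees between x :: t and t
    have hcongr : ∀ v : Int, x < v → walk (x :: t) v = walk t v := by
      intro v hv
      apply walk_congr ((x :: t).filter (fun z => decide (v ≤ z))).length _ _ v le_rfl
      intro u hu
      simp only [List.contains_cons]
      have : (u == x) = false := by simp; omega
      rw [this]; simp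
    have hfiltr : ∀ (l : List Int), (∀ v ∈ l, x + 1 < v) →
        l.filter (fun v => !(x :: t).contains (v - 1)) = l.filter (fun v => !t.contains (v - 1)) := by
      intro l hl
      apply List.filter_congr
      intro v hv
      have := hl v hv
      simp only [List.contains_cons]
      have : (v - 1 == x) = false := by simp; omega
      rw [this]; simp
    cases t with
    | nil =>
      have hw : walk [x] x = [x] := by
        rw [walk_eq]
        simp only [List.contains_cons, List.contains_nil]
        have h1 : (x == x) = true := by simp
        have h2 : walk [x] (x + 1) = [] := by
          rw [walk_eq]
          have : (x + 1 == x) = false := by simp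
          simp
        simp [h2]
      simp only [List.filter_cons, hxstart]
      simp [groupR, hw]
    | cons y t' =>
      have hxy : x < y := hgt y (by simp)
      have hy1 : y ∉ t' := by
        intro h
        have := (List.pairwise_cons.mp hpt).1 y h
        omega
      obtain ⟨r, rs, hgr⟩ := groupR_cons_head y t'
      have iht := ih hpt
      by_cases hsucc : y = x + 1
      · -- x's run continues into y = x+1
        subst hsucc
        -- groupR (x :: (x+1) :: t') = (x :: (x+1) :: r) :: rs
        have hgs : groupR (x :: (x + 1) :: t') = (x :: (x + 1) :: r) :: rs := by
          rw [groupR_cons, hgr]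
          simp
        -- from IH: x+1 is a start in t = (x+1)::t'
        have hstart_t : (((x + 1) :: t').contains (x + 1 - 1)) = false := by
          simp only [List.contains_eq_mem, List.mem_cons, decide_eq_false_iff_not, not_or]
          exact ⟨by omega, fun hmem => by have := (List.pairwise_cons.mp hpt).1 _ hmem; omega⟩
        have iht' : ((x + 1) :: r) :: rs
            = walk ((x + 1) :: t') (x + 1) ::
              (t'.filter (fun v => !((x + 1) :: t').contains (v - 1))).map (walk ((x + 1) :: t')) := by
          rw [← hgr, iht]
          have hxt' : x ∉ t' := fun hm => by
            have := (List.pairwise_cons.mp hpt).1 _ hm; omega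
          simp [hxt']
        -- x+1 is NOT a start in s, and t' filters agree between s and t
        have hnot : ((x :: (x + 1) :: t').contains (x + 1 - 1)) = true := by
          simp only [List.contains_cons]
          have : (x + 1 - 1 == x) = true := by simp
          simp
        have ht'big : ∀ v ∈ t', x + 1 < v := by
          intro v hv
          have := (List.pairwise_cons.mp hpt).1 v hv
          omega
        rw [hgs]
        simp only [List.filter_cons, hxstart, hnot]
        simp only [Bool.not_false, Bool.not_true, if_pos, if_neg, Bool.false_eq_true,
          not_false_iff, List.map_cons]
        rw [hfiltr t' ht'big]
        -- head: walk s x = x :: walk t (x+1) = x :: (x+1) :: r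
        have hwx : walk (x :: (x + 1) :: t') x = x :: walk ((x + 1) :: t') (x + 1) := by
          rw [walk_eq]
          have : ((x :: (x + 1) :: t').contains x) = true := by simp
          rw [this, hcongr (x + 1) (by omega)]
          simp
        have hhead := (List.cons.injEq _ _ _ _).mp iht'.symm
        rw [hwx, hhead.1, ← hhead.2]
        congr 1
        apply List.map_congr_left
        intro v hv
        have hv' : v ∈ t' := List.mem_of_mem_filter hv
        exact (hcongr v (by have := ht'big v hv'; omega)).symm
      · -- y > x + 1: x's run is just [x]
        have hybig : x + 1 < y := by omega
        have ht'big : ∀ v ∈ (y :: t'), x + 1 < v := by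
          intro v hv
          rcases List.mem_cons.mp hv with h | h
          · omega
          · have := (List.pairwise_cons.mp hpt).1 v h; omega
        have hgs : groupR (x :: y :: t') = [x] :: (y :: r) :: rs := by
          rw [groupR_cons, hgr]
          simp [hsucc]
        have hwx : walk (x :: y :: t') x = [x] := by
          rw [walk_eq]
          have h1 : ((x :: y :: t').contains x) = true := by simp
          have h2 : walk (x :: y :: t') (x + 1) = [] := by
            have : ((x :: y :: t').contains (x + 1)) = false := by
              have hA : x + 1 ∉ (x :: y :: t') := by
                intro hm
                rcases List.mem_cons.mp hm with h | hm2
                · omega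
                · rcases List.mem_cons.mp hm2 with h | h
                  · omega
                  · have := ht'big _ (List.mem_cons_of_mem _ h); omega
              simpa [List.contains_eq_mem] using hA
            rw [walk_eq, this]
            simp
          simp [h2]
        rw [hgs, List.filter_cons, hxstart]
        simp only [Bool.not_false, if_pos]
        rw [hfiltr (y :: t') ht'big, List.map_cons, hwx, ← hgr, iht]
        congr 1
        apply List.map_congr_left
        intro v hv
        have hv' : v ∈ (y :: t') := List.mem_of_mem_filter hv
        exact (hcongr v (by have := ht'big v hv'; omega)).symm

-- B's fold appends exactly the filtered walks of the detected starts
theorem foldl_bStep_eq (S : List Int) (last : Int) :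
    ∀ (s : List Int) (out : List (List Int)),
      s.foldl (bStep S last) out
        = out ++ ((s.filter (fun v => !S.contains (v - 1))).map (walk S)).filter
            (fun r => !r.contains 0 && !r.contains last) := by
  intro s
  induction s with
  | nil => intro out; simp
  | cons v s' ih =>
    intro out
    rw [List.foldl_cons]
    by_cases hcm : (v - 1) ∈ S
    · have h1 : bStep S last out v = out := by simp [bStep, hcm]
      have h2 : List.filter (fun v => !S.contains (v - 1)) (v :: s')
          = List.filter (fun v => !S.contains (v - 1)) s' := by
        rw [List.filter_cons]; simp [hcm]
      rw [h1, h2, ih]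
    · have h2 : List.filter (fun v => !S.contains (v - 1)) (v :: s')
          = v :: List.filter (fun v => !S.contains (v - 1)) s' := by
        rw [List.filter_cons]; simp [hcm]
      cases hk : (!(walk S v).contains 0 && !(walk S v).contains last) with
      | true =>
        have h0 : 0 ∉ walk S v := by
          have := (Bool.and_eq_true _ _).mp hk; simpa using this.1
        have hl : last ∉ walk S v := by
          have := (Bool.and_eq_true _ _).mp hk; simpa using this.2
        have h1 : bStep S last out v = out ++ [walk S v] := by
          simp [bStep, hcm, h0, hl]
        rw [h1, ih, h2, List.map_cons]
        simp only [List.filter_cons, hk]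
        simp
      | false =>
        have hor : 0 ∈ walk S v ∨ last ∈ walk S v := by
          rcases Bool.and_eq_false_iff.mp hk with h | h
          · left; simpa using h
          · right; simpa using h
        have h1 : bStep S last out v = out := by
          rcases hor with h | h <;> simp [bStep, hcm, h]
        rw [h1, ih, h2, List.map_cons]
        simp only [List.filter_cons, hk]
        simp

-- membership in sorted(set(aa)) agrees with membership in set(aa)
theorem contains_sorted_ofList (aa : List Int) (u : Int) :
    ((PySem.List.sorted (PySem.Set.ofList aa) (fun x => x) false).contains u)
      = (List.contains (PySem.Set.ofList aa) u) := by
  rw [List.contains_eq_mem, List.contains_eq_mem]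
  simp [PySem.List.mem_sorted]

-- ===== VERDICT (by name: the statement is the Claim_ definition above) =====
theorem find_continus_spec : Claim_equal_find_continus := by
  intro aa _
  unfold Spec_find_continus
  cases haa : aa with
  | nil => rfl
  | cons a as =>
    have hne : aa ≠ [] := by rw [haa]; simp
    rw [← haa]
    have hlast : PySem.List.pyGet? aa (-1) = some (aa.getLast hne) := by
      rw [PySem.List.pyGet?_neg_one, List.getLast?_eq_some_getLast hne]
    unfold find_continus find_continus_alt
    rw [hlast]
    have hmain := main_inv aa (aa.getLast hne) hlast
      (PySem.List.sorted (PySem.Set.ofList aa) (fun x => x) false) [] []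
      (PySem.List.sorted_ofList_pairwise_lt aa)
      (by
        intro x _
        rw [List.contains_eq_mem]
        simp [PySem.List.mem_sorted, PySem.Set.mem_ofList])
      (by intro p h; simp at h)
    simp only [List.isEmpty_nil, if_true] at hmain
    rw [hmain]
    rw [foldl_adjStep_groupR, groupR_eq_walk _ (PySem.List.sorted_ofList_pairwise_lt aa)]
    show _ = (PySem.List.sorted (PySem.Set.ofList aa) (fun x => x) false).foldl
      (bStep (PySem.Set.ofList aa) (aa.getLast hne)) []
    rw [foldl_bStep_eq]
    simp only [List.nil_append]
    congr 1
    have hfil : (PySem.List.sorted (PySem.Set.ofList aa) (fun x => x) false).filter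
          (fun v => !(PySem.List.sorted (PySem.Set.ofList aa) (fun x => x) false).contains (v - 1))
        = (PySem.List.sorted (PySem.Set.ofList aa) (fun x => x) false).filter
          (fun v => !(List.contains (PySem.Set.ofList aa) (v - 1))) := by
      apply List.filter_congr
      intro v _
      rw [contains_sorted_ofList]
    rw [hfil]
    apply List.map_congr_left
    intro v _
    apply walk_congr ((PySem.List.sorted (PySem.Set.ofList aa) (fun x => x) false).filter
      (fun x => decide (v ≤ x))).length _ _ v le_rfl
    intro u _
    exact contains_sorted_ofList aa u
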